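-- pv_equiv track=rewrite | github.com/Macinton-Development/MacintonC | BML.py | parse
-- ===== SOURCE A (Python) =====
-- def array_of_strings_sum(array:list, parse=''):
--     out = ''
--     for element in array:
--         out += element + parse
--     return out
--
-- def parse(line:str):
--     out = []
--     to_append = []
--     is_string = 0
--     for element in line:
--         if element == '"':
--             is_string = not is_string
--             to_append.append(element)
--         else:
--             if element == ';':
--                 if len(to_append) > 0:
--                     if to_append[0] == ' ' and to_append[-1] == ' ':
--                         out.append(array_of_strings_sum(to_append[1:-1]).replace('\n', ''))
--                     elif to_append == ' ' and to_append[-1] != ' ':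
--                         out.append(array_of_strings_sum(to_append[1:]).replace('\n', ''))
--                     else:
--                         out.append(array_of_strings_sum(to_append).replace('\n', ''))
--                 to_append = []
--             else:
--                 to_append.append(element)
--     return out
-- ===== SOURCE B (Python) =====
-- def parse(line:str):
--     out = []
--     for part in line.split(';')[:-1]:
--         if not part:
--             continue
--         if part[0] == ' ' and part[-1] == ' ':
--             part = part[1:-1]
--         out.append(part.replace('\n', ''))
--     return out
-- ===== Notes on version B (the rewrite author's own statement) =====
-- stated objective: faster
-- what changed: B replaces A's character-by-character scan with a quote-toggle flag and a manually maintained accumulator list by a single str.split followed by a per-segment pass (drop the trailing segment, skip empty ones, trim one space per side only when both ends are spaces, strip newlines).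
import Mathlib
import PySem

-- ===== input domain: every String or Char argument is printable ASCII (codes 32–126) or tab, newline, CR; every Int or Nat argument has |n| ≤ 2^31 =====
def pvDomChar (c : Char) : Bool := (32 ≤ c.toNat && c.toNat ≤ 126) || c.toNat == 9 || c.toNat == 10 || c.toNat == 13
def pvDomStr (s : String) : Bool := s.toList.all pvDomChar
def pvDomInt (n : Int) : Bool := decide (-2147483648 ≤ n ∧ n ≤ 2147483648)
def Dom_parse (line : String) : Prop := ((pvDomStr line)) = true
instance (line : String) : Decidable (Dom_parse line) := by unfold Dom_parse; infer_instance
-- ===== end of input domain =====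

-- B replaces A's char-by-char scan (quote flag + manual accumulator) with split(';'), drop
-- the trailing segment, and a per-segment pass; equal return value, proved below.

-- ===== PORT A =====
-- 'out += element + parse' with parse = '' and each element a 1-char string;
-- Python strings are modelled as List Char here (PySem convention).
def array_of_strings_sum (array : List Char) (parse : List Char) : List Char :=
  array.foldl (fun out element => out ++ [element] ++ parse) []

-- one iteration of A's 'for element in line' loop over the state (out, to_append, is_string)
def parseStep (st : List String × List Char × Bool) (element : Char) :
    List String × List Char × Bool :=
  match st with
  | (out, to_append, is_string) =>
    if element = '"' then (out, to_append ++ [element], !is_string)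
    else if element = ';' then
      (if to_append.length > 0 then
        if PySem.List.pyGet? to_append 0 = some ' ' ∧ PySem.List.pyGet? to_append (-1) = some ' ' then
          out ++ [String.ofList (PySem.Chars.replace
            (array_of_strings_sum (PySem.List.slice to_append (some 1) (some (-1))) []) ['\n'] [])]
        -- Python's 'elif to_append == " "' compares a list with a str: always False, unreachable
        else
          out ++ [String.ofList (PySem.Chars.replace (array_of_strings_sum to_append []) ['\n'] [])]
      else out, [], is_string)
    else (out, to_append ++ [element], is_string)

def parse (line : String) : List String :=
  (line.toList.foldl parseStep ([], [], false)).1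

-- ===== PORT B =====
-- one iteration of B's 'for part in line.split(';')[:-1]' loop
def parseAltStep (out : List String) (part : List Char) : List String :=
  if part ≠ [] then
    let s := if PySem.List.pyGet? part 0 = some ' ' ∧ PySem.List.pyGet? part (-1) = some ' '
             then PySem.List.slice part (some 1) (some (-1)) else part
    out ++ [String.ofList (PySem.Chars.replace s ['\n'] [])]
  else out

def parse_alt (line : String) : List String :=
  let parts := PySem.Chars.splitOn line.toList [';']        -- line.split(';')
  (PySem.List.slice parts none (some (-1))).foldl parseAltStep []   -- parts[:-1]

-- ===== PRECONDITION & SPEC =====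
def Spec_parse (line : String) (out : List String) : Prop := out = parse_alt line
instance (line : String) (out : List String) : Decidable (Spec_parse line out) := by unfold Spec_parse; infer_instance

-- ===== CLAIM (what is proved, stated in full; the proofs are below) =====
def Claim_equal_parse : Prop := ∀ (line : String), Dom_parse line → Spec_parse line (parse line)

-- ===== LEMMAS AND PROOFS =====

-- reference split of a char list on ';' (always nonempty, like Python's str.split)
def semiSplit : List Char → List (List Char)
  | [] => [[]]
  | c :: rest =>
    if c = ';' then [] :: semiSplit rest
    else match semiSplit rest with
      | [] => [[c]]
      | s :: ss => (c :: s) :: ss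

lemma semiSplit_ne_nil (l : List Char) : semiSplit l ≠ [] := by
  cases l with
  | nil => simp [semiSplit]
  | cons c rest =>
    simp only [semiSplit]
    split_ifs
    · simp
    · cases h : semiSplit rest <;> simp

lemma array_of_strings_sum_nil (cs : List Char) : array_of_strings_sum cs [] = cs := by
  have h : ∀ (cs acc : List Char), cs.foldl (fun out element => out ++ [element] ++ []) acc = acc ++ cs := by
    intro cs
    induction cs with
    | nil => simp
    | cons c t ih =>
      intro acc
      simp only [List.foldl_cons]
      rw [ih]
      simp
  simpa [array_of_strings_sum] using h cs []

-- what both programs append for one raw segment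
def emit (seg : List Char) : List String :=
  if seg = [] then []
  else [String.ofList (PySem.Chars.replace
    (if PySem.List.pyGet? seg 0 = some ' ' ∧ PySem.List.pyGet? seg (-1) = some ' '
     then PySem.List.slice seg (some 1) (some (-1)) else seg) ['\n'] [])]

-- A's scan, reorganised: output segments and final accumulator of the rest of the line
def splitsEmit (acc : List Char) : List Char → List String × List Char
  | [] => ([], acc)
  | c :: rest =>
    if c = ';' then
      let r := splitsEmit [] rest
      (emit acc ++ r.1, r.2)
    else splitsEmit (acc ++ [c]) rest

lemma parseStep_fold (l : List Char) : ∀ (out : List String) (acc : List Char) (b : Bool),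
    ∃ b', l.foldl parseStep (out, acc, b) = (out ++ (splitsEmit acc l).1, (splitsEmit acc l).2, b') := by
  induction l with
  | nil => intro out acc b; exact ⟨b, by simp [splitsEmit]⟩
  | cons c rest ih =>
    intro out acc b
    by_cases hq : c = '"'
    · subst hq
      obtain ⟨b', hb'⟩ := ih out (acc ++ ['"']) (!b)
      exact ⟨b', by simpa [parseStep, splitsEmit] using hb'⟩
    · by_cases hs : c = ';'
      · subst hs
        obtain ⟨b', hb'⟩ := ih (out ++ emit acc) [] b
        refine ⟨b', ?_⟩
        have hstep : parseStep (out, acc, b) ';' = (out ++ emit acc, [], b) := by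
          by_cases hnil : acc = []
          · subst hnil; simp [parseStep, emit]
          · simp only [parseStep, emit, if_neg hnil]
            have hlen : acc.length > 0 := List.length_pos_iff.mpr hnil
            split_ifs with h1 <;>
              simp [array_of_strings_sum_nil]
        simp only [List.foldl_cons, hstep, splitsEmit]
        rw [hb']
        simp
      · obtain ⟨b', hb'⟩ := ih out (acc ++ [c]) b
        exact ⟨b', by simpa [parseStep, hq, hs, splitsEmit] using hb'⟩

-- head-prepend helper for relating splitsEmit with semiSplit
lemma splitsEmit_eq_semiSplit (l : List Char) : ∀ (acc : List Char),
    (splitsEmit acc l).1 =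
      ((match semiSplit l with
        | [] => []
        | s :: ss => (acc ++ s) :: ss).dropLast).flatMap emit := by
  induction l with
  | nil => intro acc; simp [splitsEmit, semiSplit]
  | cons c rest ih =>
    intro acc
    by_cases hs : c = ';'
    · subst hs
      obtain ⟨s, ss, hsp⟩ : ∃ s ss, semiSplit rest = s :: ss := by
        cases h : semiSplit rest with
        | nil => exact absurd h (semiSplit_ne_nil rest)
        | cons s ss => exact ⟨s, ss, rfl⟩
      have := ih []
      simp only [splitsEmit, semiSplit, this, hsp]
      simp
    · obtain ⟨s, ss, hsp⟩ : ∃ s ss, semiSplit rest = s :: ss := by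
        cases h : semiSplit rest with
        | nil => exact absurd h (semiSplit_ne_nil rest)
        | cons s ss => exact ⟨s, ss, rfl⟩
      have := ih (acc ++ [c])
      simp only [splitsEmit, if_neg hs, semiSplit, hsp] at this ⊢
      simpa using this

lemma splitOn_go_single : ∀ (fuel : Nat) (l cur : List Char) (acc : List (List Char)),
    l.length ≤ fuel →
    PySem.Chars.splitOn.go [';'] fuel l cur acc =
      acc.reverse ++ (match semiSplit l with
        | [] => []
        | s :: ss => (cur.reverse ++ s) :: ss) := by
  intro fuel
  induction fuel with
  | zero =>
    intro l cur acc hl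
    have : l = [] := List.length_eq_zero_iff.mp (Nat.le_zero.mp hl)
    subst this
    simp [PySem.Chars.splitOn.go, semiSplit]
  | succ fuel ih =>
    intro l cur acc hl
    cases l with
    | nil => simp [PySem.Chars.splitOn.go, semiSplit]
    | cons c rest =>
      by_cases hs : c = ';'
      · subst hs
        have hpre : List.isPrefixOf [';'] (';' :: rest) = true := by
          simp [List.isPrefixOf]
        obtain ⟨s, ss, hsp⟩ : ∃ s ss, semiSplit rest = s :: ss := by
          cases h : semiSplit rest with
          | nil => exact absurd h (semiSplit_ne_nil rest)
          | cons s ss => exact ⟨s, ss, rfl⟩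
        have hrec := ih rest [] (cur.reverse :: acc) (by simpa using Nat.le_of_succ_le_succ hl)
        rw [show PySem.Chars.splitOn.go [';'] (fuel + 1) (';' :: rest) cur acc
              = PySem.Chars.splitOn.go [';'] fuel (List.drop 1 (';' :: rest)) [] (cur.reverse :: acc) from by
            simp [PySem.Chars.splitOn.go, hpre]]
        simp only [List.drop_one, List.tail_cons]
        rw [hrec, hsp]
        simp [semiSplit, hsp]
      · have hpre : List.isPrefixOf [';'] (c :: rest) = false := by
          have hs2 : ¬(';' = c) := fun h => hs h.symm
          simp [List.isPrefixOf, hs2]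
        obtain ⟨s, ss, hsp⟩ : ∃ s ss, semiSplit rest = s :: ss := by
          cases h : semiSplit rest with
          | nil => exact absurd h (semiSplit_ne_nil rest)
          | cons s ss => exact ⟨s, ss, rfl⟩
        have hs' : ¬(';' = c) := fun h => hs h.symm
        have hrec := ih rest (c :: cur) acc (by simpa using Nat.le_of_succ_le_succ hl)
        rw [show PySem.Chars.splitOn.go [';'] (fuel + 1) (c :: rest) cur acc
              = PySem.Chars.splitOn.go [';'] fuel rest (c :: cur) acc from by
            simp [PySem.Chars.splitOn.go, hpre]]
        rw [hrec, hsp]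
        simp [semiSplit, hs, hsp]

lemma splitOn_eq_semiSplit (l : List Char) : PySem.Chars.splitOn l [';'] = semiSplit l := by
  have := splitOn_go_single (l.length + 1) l [] [] (Nat.le_succ _)
  simp only [PySem.Chars.splitOn, this]
  obtain ⟨s, ss, hsp⟩ : ∃ s ss, semiSplit l = s :: ss := by
    cases h : semiSplit l with
    | nil => exact absurd h (semiSplit_ne_nil l)
    | cons s ss => exact ⟨s, ss, rfl⟩
  simp [hsp]

lemma foldl_parseAltStep (segs : List (List Char)) : ∀ (out : List String),
    segs.foldl parseAltStep out = out ++ segs.flatMap emit := by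
  induction segs with
  | nil => intro out; simp
  | cons s t ih =>
    intro out
    by_cases h : s = []
    · subst h; simp [parseAltStep, emit, ih]
    · simp [parseAltStep, emit, h, ih]

-- ===== VERDICT (by name: the statement is the Claim_ definition above) =====
theorem parse_spec : Claim_equal_parse := by
  intro line _
  unfold Spec_parse parse parse_alt
  obtain ⟨b', hb'⟩ := parseStep_fold line.toList [] [] false
  rw [hb']
  simp only [splitOn_eq_semiSplit, PySem.List.slice_to_neg_one, foldl_parseAltStep,
    List.nil_append, splitsEmit_eq_semiSplit]
  obtain ⟨s, ss, hsp⟩ : ∃ s ss, semiSplit line.toList = s :: ss := by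
    cases h : semiSplit line.toList with
    | nil => exact absurd h (semiSplit_ne_nil line.toList)
    | cons s ss => exact ⟨s, ss, rfl⟩
  simp [hsp]
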